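-- pv_equiv track=rewrite | github.com/vladcheck/university-materials | 1С/ПР/АиСД 1К1С/2/2.py | prettify_ferma
-- ===== SOURCE A (Python) =====
-- def prettify_ferma(nums):
--     if type(nums) == str:
--         return nums
--     res = ""
--     primes = set(nums)
--     for n in sorted(primes):
--         res += f"{n}^{nums.count(n)},"
--     return res
-- ===== SOURCE B (Python) =====
-- def prettify_ferma(nums):
--     if type(nums) == str:
--         return nums
--     res = ""
--     s = sorted(nums)
--     i = 0
--     while i < len(s):
--         j = i + 1
--         while j < len(s) and s[j] == s[i]:
--             j += 1
--         res += f"{s[i]}^{j - i},"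
--         i = j
--     return res
-- ===== Notes on version B (the rewrite author's own statement) =====
-- stated objective: faster
-- what changed: B sorts the whole list once and emits each group in one left-to-right run-length pass over consecutive equal elements, instead of building a set and calling nums.count for every distinct value.
import Mathlib
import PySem

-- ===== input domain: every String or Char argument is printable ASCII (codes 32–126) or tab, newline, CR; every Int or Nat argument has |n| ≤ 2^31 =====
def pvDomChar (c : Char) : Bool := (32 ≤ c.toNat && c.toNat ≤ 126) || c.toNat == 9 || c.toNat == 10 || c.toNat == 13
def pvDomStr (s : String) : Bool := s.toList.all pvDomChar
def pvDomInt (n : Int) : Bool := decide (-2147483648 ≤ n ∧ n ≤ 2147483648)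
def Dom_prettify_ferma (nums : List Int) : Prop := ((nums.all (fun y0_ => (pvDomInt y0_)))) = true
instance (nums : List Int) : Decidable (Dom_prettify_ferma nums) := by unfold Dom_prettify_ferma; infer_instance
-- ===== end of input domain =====

-- B replaces set(nums) + a repeated nums.count scan per distinct value by one sort and a
-- single run-length grouping pass (objective: faster, measured).
-- A's `type(nums)==str` guard cannot fire for nums : List Int and is dropped in both ports.

-- ===== PORT A =====
-- res += f"{n}^{nums.count(n)}," over sorted(set(nums))
def prettify_ferma (nums : List Int) : String :=
  let res : String := ""
  let primes : PySem.Set Int := PySem.Set.ofList nums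
  (PySem.List.sorted primes (fun x => x) false).foldl
    (fun res n => res ++ (PySem.Int.toStr n ++ "^" ++ PySem.Int.toStr ((nums.count n : Nat) : Int) ++ ","))
    res

-- ===== PORT B =====
-- the inner while loop of Source B: the run of elements equal to the head, then recurse on the rest
def pfGo : List Int → String
  | [] => ""
  | x :: xs =>
      PySem.Int.toStr x ++ "^" ++ PySem.Int.toStr (((xs.takeWhile (· == x)).length + 1 : Nat) : Int) ++ "," ++
        pfGo (xs.dropWhile (· == x))
termination_by l => l.length
decreasing_by
  simpa using Nat.lt_succ_of_le (List.length_dropWhile_le _ _)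

def prettify_ferma_alt (nums : List Int) : String :=
  pfGo (PySem.List.sorted nums (fun x => x) false)

-- ===== PRECONDITION & SPEC =====
def Spec_prettify_ferma (nums : List Int) (out : String) : Prop := out = prettify_ferma_alt nums
instance (nums : List Int) (out : String) : Decidable (Spec_prettify_ferma nums out) := by unfold Spec_prettify_ferma; infer_instance

-- ===== CLAIM (what is proved, stated in full; the proofs are below) =====
def Claim_equal_prettify_ferma : Prop := ∀ (nums : List Int), Dom_prettify_ferma nums → Spec_prettify_ferma nums (prettify_ferma nums)

-- ===== LEMMAS AND PROOFS =====

-- concatenation of the per-group pieces, used to relate the two loops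
def strConcat : List String → String
  | [] => ""
  | s :: t => s ++ strConcat t

theorem foldl_append_str (f : Int → String) :
    ∀ (l : List Int) (acc : String),
      l.foldl (fun r n => r ++ f n) acc = acc ++ strConcat (l.map f) := by
  intro l
  induction l with
  | nil => intro acc; simp [strConcat]
  | cons x t ih =>
      intro acc
      simp [List.foldl_cons, strConcat, ih, String.append_assoc]

-- the group piece
def piece (n : Int) (c : Nat) : String :=
  PySem.Int.toStr n ++ "^" ++ PySem.Int.toStr (c : Int) ++ ","

-- distinct elements of l in sorted order, as A computes them
def Dsort (l : List Int) : List Int :=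
  PySem.List.sorted (PySem.Set.ofList l) (fun x => x) false

theorem mem_Dsort {l : List Int} {y : Int} : y ∈ Dsort l ↔ y ∈ l := by
  simp only [Dsort, PySem.List.mem_sorted, PySem.Set.mem_ofList]

theorem rest_gt {x : Int} {xs : List Int} (h : (x :: xs).Pairwise (· ≤ ·)) :
    ∀ y ∈ xs.dropWhile (· == x), x < y := by
  have hxs : xs.Pairwise (· ≤ ·) := h.of_cons
  have hle : ∀ y ∈ xs, x ≤ y := by
    intro y hy; exact (List.pairwise_cons.mp h).1 y hy
  cases hrest : xs.dropWhile (· == x) with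
  | nil => intro y hy; simp at hy
  | cons z t =>
      have hz_ne : ¬ (z == x) = true := by
        have := List.head?_dropWhile_not (p := (· == x)) (l := xs)
        rw [hrest] at this; simpa using this
      have hsub : (z :: t).Sublist xs := hrest ▸ List.dropWhile_sublist _
      have hz_mem : z ∈ xs := hsub.mem (by simp)
      have hz : x < z := lt_of_le_of_ne (hle z hz_mem)
        (fun hxz => hz_ne (by rw [← hxz]; exact beq_self_eq_true x))
      have hzt : ∀ y ∈ t, z ≤ y := (List.pairwise_cons.mp (hxs.sublist hsub)).1
      intro y hy
      rcases List.mem_cons.mp hy with rfl | hy'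
      · exact hz
      · exact lt_of_lt_of_le hz (hzt y hy')

theorem run_eq {x : Int} {xs : List Int} :
    ∀ y ∈ xs.takeWhile (· == x), y = x := by
  intro y hy
  have := List.mem_takeWhile_imp hy
  simpa using this

theorem count_head {x : Int} {xs : List Int} (h : (x :: xs).Pairwise (· ≤ ·)) :
    (x :: xs).count x = (xs.takeWhile (· == x)).length + 1 := by
  have hsplit : xs = xs.takeWhile (· == x) ++ xs.dropWhile (· == x) :=
    (List.takeWhile_append_dropWhile).symm
  have hrun : (xs.takeWhile (· == x)).count x = (xs.takeWhile (· == x)).length := by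
    apply List.count_eq_length.mpr
    intro y hy; exact ((run_eq y hy) ▸ rfl)
  have hrest : (xs.dropWhile (· == x)).count x = 0 := by
    apply List.count_eq_zero.mpr
    intro hx
    exact absurd (rest_gt h x hx) (lt_irrefl x)
  have hxs : xs.count x = (xs.takeWhile (· == x)).length := by
    conv_lhs => rw [hsplit]
    rw [List.count_append, hrun, hrest]
    omega
  rw [List.count_cons_self, hxs]
theorem count_rest {x : Int} {xs : List Int} {n : Int} (hn : x < n) :
    (x :: xs).count n = (xs.dropWhile (· == x)).count n := by
  have hsplit : xs = xs.takeWhile (· == x) ++ xs.dropWhile (· == x) :=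
    (List.takeWhile_append_dropWhile).symm
  have hrun : (xs.takeWhile (· == x)).count n = 0 := by
    apply List.count_eq_zero.mpr
    intro hx
    have := run_eq _ hx
    omega
  have hx0 : (x :: xs).count n = xs.count n := by
    rw [List.count_cons]
    simp [show ¬ (x = n) by omega]
  rw [hx0]
  conv_lhs => rw [hsplit]
  rw [List.count_append, hrun, Nat.zero_add]
theorem Dsort_cons {x : Int} {xs : List Int} (h : (x :: xs).Pairwise (· ≤ ·)) :
    Dsort (x :: xs) = x :: Dsort (xs.dropWhile (· == x)) := by
  apply PySem.List.sorted_eq_of_perm_of_pairwise_lt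
  · -- perm with Set.ofList (x :: xs)
    apply (List.perm_ext_iff_of_nodup _ (PySem.Set.nodup_ofList _)).mpr
    · intro y
      simp only [List.mem_cons, mem_Dsort, PySem.Set.mem_ofList]
      constructor
      · rintro (rfl | hy)
        · exact Or.inl rfl
        · have : y ∈ xs := (List.dropWhile_sublist _).mem hy
          exact Or.inr this
      · intro hy
        rcases hy with rfl | hy'
        · exact Or.inl rfl
        · -- y ∈ xs: either in the run (= x) or in the rest
          have := List.takeWhile_append_dropWhile (p := (· == x)) (l := xs)
          rw [← this] at hy'
          rcases List.mem_append.mp hy' with hy1 | hy2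
          · exact Or.inl (run_eq y hy1)
          · exact Or.inr hy2
    · -- nodup of x :: Dsort rest
      apply List.nodup_cons.mpr
      constructor
      · intro hx
        exact lt_irrefl x (rest_gt h x (mem_Dsort.mp hx))
      · have : (Dsort (xs.dropWhile (· == x))).Perm (PySem.Set.ofList (xs.dropWhile (· == x))) :=
          PySem.List.sorted_perm _ _ _
        exact this.nodup_iff.mpr (PySem.Set.nodup_ofList _)
  · -- pairwise <
    apply List.pairwise_cons.mpr
    refine ⟨?_, ?_⟩
    · intro y hy; exact rest_gt h y (mem_Dsort.mp hy)
    · simpa [Dsort] using PySem.List.sorted_ofList_pairwise_lt (xs := xs.dropWhile (· == x))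

-- main invariant: on a sorted list the run-length pass equals A's grouped pieces
theorem pfGo_eq : ∀ (l : List Int), l.Pairwise (· ≤ ·) →
    pfGo l = strConcat ((Dsort l).map (fun n => piece n (l.count n))) := by
  intro l
  induction l using pfGo.induct with
  | case1 =>
      intro _
      have h0 : Dsort ([] : List Int) = [] := rfl
      simp [pfGo, h0, strConcat]
  | case2 x xs ih =>
      intro h
      have hrest_sorted : (xs.dropWhile (· == x)).Pairwise (· ≤ ·) :=
        h.of_cons.sublist (List.dropWhile_sublist _)
      rw [pfGo, Dsort_cons h, List.map_cons, strConcat, ih hrest_sorted]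
      have hc : (x :: xs).count x = (xs.takeWhile (· == x)).length + 1 := count_head h
      have hmap : (Dsort (xs.dropWhile (· == x))).map (fun n => piece n ((x :: xs).count n))
          = (Dsort (xs.dropWhile (· == x))).map (fun n => piece n ((xs.dropWhile (· == x)).count n)) := by
        apply List.map_congr_left
        intro n hn
        rw [count_rest (rest_gt h n (mem_Dsort.mp hn))]
      rw [← hmap, piece, hc]

theorem count_sorted (nums : List Int) (n : Int) :
    (PySem.List.sorted nums (fun x => x) false).count n = nums.count n :=
  (PySem.List.sorted_perm _ _ _).count_eq n

theorem Dsort_sorted_eq (nums : List Int) :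
    Dsort (PySem.List.sorted nums (fun x => x) false) = Dsort nums := by
  unfold Dsort
  apply PySem.List.sorted_eq_sorted_of_perm _ _ _ (fun a b => id)
  apply (List.perm_ext_iff_of_nodup (PySem.Set.nodup_ofList _) (PySem.Set.nodup_ofList _)).mpr
  intro y
  simp [PySem.Set.mem_ofList, PySem.List.mem_sorted]

-- ===== VERDICT (by name: the statement is the Claim_ definition above) =====
theorem prettify_ferma_spec : Claim_equal_prettify_ferma := by
  intro nums _
  unfold Spec_prettify_ferma prettify_ferma prettify_ferma_alt
  show (PySem.List.sorted (PySem.Set.ofList nums) (fun x => x) false).foldl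
      (fun res n => res ++ (PySem.Int.toStr n ++ "^" ++ PySem.Int.toStr ((nums.count n : Nat) : Int) ++ ",")) ""
    = pfGo (PySem.List.sorted nums (fun x => x) false)
  have hs : (PySem.List.sorted nums (fun x => x) false).Pairwise (· ≤ ·) := by
    simpa using PySem.List.sorted_pairwise (xs := nums) (key := fun x => x)
  rw [pfGo_eq _ hs, Dsort_sorted_eq]
  rw [foldl_append_str (fun n => PySem.Int.toStr n ++ "^" ++ PySem.Int.toStr ((nums.count n : Nat) : Int) ++ ",")]
  simp only [Dsort, piece, String.empty_append]
  congr 1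
  apply List.map_congr_left
  intro n _
  rw [count_sorted]
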